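-- pv_equiv track=rewrite | github.com/oliveira002/FEUP-IA | PROJ1/city.py | parse_open_hours
-- ===== SOURCE A (Python) =====
-- def parse_open_hours(times: list[int]):
--     """
--         Parses the list of opening hours
--         Parameters:
--             - times: list of opening hours
--         Returns list of tuples with open hours
--     """
--     result = []
--     start = None
--     for i in range(len(times)):
--         if times[i] == 1:
--             if start is None:
--                 start = i
--         else:
--             if start is not None:
--                 result.append((start * 3600, i * 3600))
--                 start = None
--     if start is not None:
--         result.append((start * 3600, len(times) * 3600))
--     return result
-- ===== SOURCE B (Python) =====
-- def parse_open_hours(times):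
--     # Run-based scan: find each maximal run of equal values; a run of 1s is an open interval.
--     result = []
--     i = 0
--     n = len(times)
--     while i < n:
--         j = i + 1
--         while j < n and times[j] == times[i]:
--             j += 1
--         if times[i] == 1:
--             result.append((i * 3600, j * 3600))
--         i = j
--     return result
-- ===== Notes on version B (the rewrite author's own statement) =====
-- stated objective: alternative
-- what changed: Replaces A's per-index sentinel (start=None) state machine with a run-based scan that jumps over each maximal run of equal values and emits an interval per run of 1s.
import Mathlib
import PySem

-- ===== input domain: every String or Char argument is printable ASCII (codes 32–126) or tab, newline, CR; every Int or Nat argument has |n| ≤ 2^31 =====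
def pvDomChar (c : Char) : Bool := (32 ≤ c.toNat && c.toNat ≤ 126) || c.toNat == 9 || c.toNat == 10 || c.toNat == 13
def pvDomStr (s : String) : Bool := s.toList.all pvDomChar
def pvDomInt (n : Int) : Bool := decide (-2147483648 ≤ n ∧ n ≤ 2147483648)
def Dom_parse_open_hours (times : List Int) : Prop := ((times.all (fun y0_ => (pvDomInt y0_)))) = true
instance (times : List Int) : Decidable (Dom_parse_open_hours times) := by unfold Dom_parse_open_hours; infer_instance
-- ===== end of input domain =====

-- B replaces A's sentinel-based open/close state machine with a run-based scan (same O(n) cost).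

-- ===== PORT A =====
-- loop body of A's 'for i in range(len(times))'; state = (result, start).
-- times[i] is always in range here, so List.getD is exact for Python's times[i].
def pvAStep (times : List Int) (s : List (Int × Int) × Option Int) (i : Nat) :
    List (Int × Int) × Option Int :=
  if times.getD i 0 = 1 then
    match s.2 with
    | none => (s.1, some (i : Int))
    | some _ => s
  else
    match s.2 with
    | none => s
    | some st => (s.1 ++ [(st * 3600, (i : Int) * 3600)], none)

-- A's trailing 'if start is not None: result.append(...)'
def pvAFin (times : List Int) (s : List (Int × Int) × Option Int) : List (Int × Int) :=
  match s.2 with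
  | none => s.1
  | some st => s.1 ++ [(st * 3600, (times.length : Int) * 3600)]

def parse_open_hours (times : List Int) : List (Int × Int) :=
  pvAFin times ((List.range times.length).foldl (pvAStep times) ([], none))

-- ===== PORT B =====
-- Source B's inner while: advance j while j < n and times[j] == v.
def pvRun (times : List Int) (v : Int) (j : Nat) : Nat :=
  if h : j < times.length ∧ times.getD j 0 = v then pvRun times v (j + 1) else j
termination_by times.length - j
decreasing_by omega

theorem pvRun_ge (times : List Int) (v : Int) (j : Nat) : j ≤ pvRun times v j := by
  fun_induction pvRun times v j with
  | case1 j h ih => omega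
  | case2 j h => omega

-- Source B's outer while loop (result.append becomes list append).
def pvBGo (times : List Int) (i : Nat) : List (Int × Int) :=
  if _h : i < times.length then
    let j := pvRun times (times.getD i 0) (i + 1)
    (if times.getD i 0 = 1 then [((i : Int) * 3600, (j : Int) * 3600)] else []) ++ pvBGo times j
  else []
termination_by times.length - i
decreasing_by have := pvRun_ge times (times.getD i 0) (i + 1); omega

def parse_open_hours_alt (times : List Int) : List (Int × Int) :=
  pvBGo times 0

-- ===== PRECONDITION & SPEC =====
def Spec_parse_open_hours (times : List Int) (out : List (Int × Int)) : Prop := out = parse_open_hours_alt times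
instance (times : List Int) (out : List (Int × Int)) : Decidable (Spec_parse_open_hours times out) := by unfold Spec_parse_open_hours; infer_instance

-- ===== CLAIM (what is proved, stated in full; the proofs are below) =====
def Claim_equal_parse_open_hours : Prop := ∀ (times : List Int), Dom_parse_open_hours times → Spec_parse_open_hours times (parse_open_hours times)

-- ===== LEMMAS AND PROOFS =====

theorem pvRun_step (times : List Int) (v : Int) (j : Nat)
    (h : j < times.length ∧ times.getD j 0 = v) :
    pvRun times v j = pvRun times v (j + 1) := by
  rw [pvRun, dif_pos h]

theorem pvRun_stop (times : List Int) (v : Int) (j : Nat)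
    (h : ¬(j < times.length ∧ times.getD j 0 = v)) :
    pvRun times v j = j := by
  rw [pvRun, dif_neg h]

theorem pvBGo_cons (times : List Int) (i : Nat) (h : i < times.length) :
    pvBGo times i =
      (if times.getD i 0 = 1 then
        [((i : Int) * 3600, ((pvRun times (times.getD i 0) (i + 1) : Nat) : Int) * 3600)]
      else []) ++ pvBGo times (pvRun times (times.getD i 0) (i + 1)) := by
  rw [pvBGo, dif_pos h]

theorem pvBGo_nil (times : List Int) (i : Nat) (h : ¬ i < times.length) :
    pvBGo times i = [] := by
  rw [pvBGo, dif_neg h]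

-- skipping a run of a non-1 value does not change B's remaining output
theorem pvSkip (times : List Int) (v : Int) (hv : v ≠ 1) :
    ∀ d k, times.length - k ≤ d → pvBGo times (pvRun times v k) = pvBGo times k := by
  intro d
  induction d with
  | zero =>
    intro k hk
    rw [pvRun_stop times v k (by omega)]
  | succ d ih =>
    intro k hk
    by_cases h : k < times.length ∧ times.getD k 0 = v
    · rw [pvRun_step times v k h, ih (k + 1) (by omega)]
      rw [pvBGo_cons times k h.1, h.2, if_neg hv]
      simpa using (ih (k + 1) (by omega)).symm
    · rw [pvRun_stop times v k h]

-- the joint loop invariant: A's loop-from-i with start=none / start=some s vs B's run scan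
theorem pvMain (times : List Int) :
    ∀ d i, times.length - i ≤ d → i ≤ times.length →
      (∀ acc, pvAFin times ((List.range' i (times.length - i)).foldl (pvAStep times) (acc, none))
          = acc ++ pvBGo times i)
      ∧ (∀ s acc, pvAFin times ((List.range' i (times.length - i)).foldl (pvAStep times) (acc, some s))
          = acc ++ (s * 3600, ((pvRun times 1 i : Nat) : Int) * 3600) :: pvBGo times (pvRun times 1 i)) := by
  intro d
  induction d with
  | zero =>
    intro i hd hi
    have hin : i = times.length := by omega
    have h0 : times.length - i = 0 := by omega
    constructor
    · intro acc
      rw [h0, pvBGo_nil times i (by omega)]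
      simp [pvAFin]
    · intro s acc
      rw [h0, pvRun_stop times 1 i (by omega), pvBGo_nil times i (by omega)]
      simp [pvAFin, hin]
  | succ d ih =>
    intro i hd hi
    by_cases hlt : i < times.length
    · have hrange : List.range' i (times.length - i) = i :: List.range' (i + 1) (times.length - (i + 1)) := by
        have h1 : times.length - i = (times.length - (i + 1)) + 1 := by omega
        rw [h1, List.range'_succ]
      have ih1 := ih (i + 1) (by omega) (by omega)
      constructor
      · intro acc
        rw [hrange]
        by_cases h1 : times.getD i 0 = 1
        · -- A records start := i; B opens the interval of this run of 1s
          simp only [List.foldl_cons, pvAStep, if_pos h1]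
          rw [ih1.2 (i : Int) acc]
          rw [pvBGo_cons times i hlt, h1, if_pos rfl]
          simp
        · -- state stays none; B skips the whole non-1 run
          simp only [List.foldl_cons, pvAStep, if_neg h1]
          rw [ih1.1 acc]
          rw [pvBGo_cons times i hlt, if_neg h1]
          rw [pvSkip times (times.getD i 0) h1 (times.length - (i + 1)) (i + 1) (by omega)]
          simp
      · intro s acc
        rw [hrange]
        by_cases h1 : times.getD i 0 = 1
        · -- run of 1s continues
          simp only [List.foldl_cons, pvAStep, if_pos h1]
          rw [ih1.2 s acc]
          rw [pvRun_step times 1 i ⟨hlt, h1⟩]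
        · -- interval closes at i
          simp only [List.foldl_cons, pvAStep, if_neg h1]
          rw [ih1.1 (acc ++ [(s * 3600, (i : Int) * 3600)])]
          rw [pvRun_stop times 1 i (fun hc => h1 hc.2)]
          rw [pvBGo_cons times i hlt, if_neg h1]
          rw [pvSkip times (times.getD i 0) h1 (times.length - (i + 1)) (i + 1) (by omega)]
          simp
    · exact ih i (by omega) hi

-- ===== VERDICT (by name: the statement is the Claim_ definition above) =====
theorem parse_open_hours_spec : Claim_equal_parse_open_hours := by
  intro times _
  unfold Spec_parse_open_hours parse_open_hours parse_open_hours_alt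
  have h := (pvMain times times.length 0 (by omega) (by omega)).1 []
  simpa [List.range_eq_range'] using h
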